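-- pv_equiv track=rewrite | github.com/alexpower9/mlp-from-scratch | src/test.py | make_diagonal
-- ===== SOURCE A (Python) =====
-- def make_diagonal(x):
--     size = len(x)
--
--     result = [[0 for _ in range(len(x))] for _ in range(len(x))]
--
--     for i in range(len(x)):
--         for j in range(len(x)):
--             if i == j:
--                 result[i][j] = x[i]
--
--     return result
-- ===== SOURCE B (Python) =====
-- def make_diagonal(x):
--     n = len(x)
--     flat = [0] * (n * n)
--     for i, val in enumerate(x):
--         flat[i * (n + 1)] = val
--     return [flat[r * n:(r + 1) * n] for r in range(n)]
-- ===== Notes on version B (the rewrite author's own statement) =====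
-- stated objective: alternative
-- what changed: Replaces A's row-of-rows zero matrix plus nested i/j scan with an i==j guard by a flat 1-D buffer of n*n zeros whose diagonal cells are written once at stride n+1, then sliced into rows.
import Mathlib
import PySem

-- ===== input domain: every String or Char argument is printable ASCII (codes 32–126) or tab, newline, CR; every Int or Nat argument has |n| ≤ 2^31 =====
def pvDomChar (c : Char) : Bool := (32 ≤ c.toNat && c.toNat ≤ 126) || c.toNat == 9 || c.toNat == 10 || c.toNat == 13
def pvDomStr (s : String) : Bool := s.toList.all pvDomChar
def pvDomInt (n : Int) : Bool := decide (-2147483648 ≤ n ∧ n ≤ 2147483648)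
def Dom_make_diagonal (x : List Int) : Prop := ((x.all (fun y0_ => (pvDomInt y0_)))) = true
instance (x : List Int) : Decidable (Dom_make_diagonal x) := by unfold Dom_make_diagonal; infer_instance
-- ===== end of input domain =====

-- B writes the diagonal once into a flat 1-D zero buffer at stride n+1 and slices it into rows,
-- instead of A's row-of-rows zero matrix plus nested i/j scan (objective: alternative).

-- ===== PORT A =====
-- literal port of A: zero matrix comprehension, then nested loops setting result[i][j] = x[i] when i == j
-- (indices produced by range are nonnegative and in range, so .toNat / getD are exact here)
def make_diagonal (x : List Int) : List (List Int) :=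
  let size := (x.length : Int)
  let result : List (List Int) :=
    (PySem.List.pyRange 0 size 1).map (fun _ => (PySem.List.pyRange 0 size 1).map (fun _ => (0 : Int)))
  (PySem.List.pyRange 0 size 1).foldl (fun result i =>
    (PySem.List.pyRange 0 size 1).foldl (fun result j =>
      if i == j then
        result.set i.toNat ((result.getD i.toNat []).set j.toNat (PySem.List.pyGetD x i 0))
      else result) result) result

-- ===== PORT B =====
-- literal port of Source B: flat [0]*(n*n) buffer, one enumerate pass writing flat[i*(n+1)] = val
-- (enumerate indices are nonnegative, so .toNat is exact), then row slices flat[r*n:(r+1)*n]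
def make_diagonal_alt (x : List Int) : List (List Int) :=
  let n := x.length
  let flat := (PySem.List.enumerate x 0).foldl
    (fun flat iv => flat.set (iv.1.toNat * (n + 1)) iv.2) (List.replicate (n * n) (0 : Int))
  (PySem.List.pyRange 0 (n : Int) 1).map (fun r =>
    PySem.List.slice flat (some (r * (n : Int))) (some ((r + 1) * (n : Int))))

-- ===== PRECONDITION & SPEC =====
def Spec_make_diagonal (x : List Int) (out : List (List Int)) : Prop := out = make_diagonal_alt x
instance (x : List Int) (out : List (List Int)) : Decidable (Spec_make_diagonal x out) := by unfold Spec_make_diagonal; infer_instance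

-- ===== CLAIM (what is proved, stated in full; the proofs are below) =====
def Claim_equal_make_diagonal : Prop := ∀ (x : List Int), Dom_make_diagonal x → Spec_make_diagonal x (make_diagonal x)


-- ===== LEMMAS AND PROOFS =====

-- the common normal form: the first m diagonal rows
def pvDiag (x : List Int) (m : Nat) : List (List Int) :=
  (List.range m).map (fun k => (List.replicate x.length (0 : Int)).set k (PySem.List.pyGetD x (k : Int) 0))

theorem pvDiag_length (x : List Int) (m : Nat) : (pvDiag x m).length = m := by
  simp [pvDiag]

theorem pvDiag_succ (x : List Int) (m : Nat) :
    pvDiag x (m + 1) = pvDiag x m ++ [(List.replicate x.length (0 : Int)).set m (PySem.List.pyGetD x (m : Int) 0)] := by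
  simp [pvDiag, List.range_succ]

theorem foldl_if_skip {A : Type} (g : A -> Int -> A) (i : Int) (l : List Int)
    (h : forall j, j ∈ l -> i ≠ j) (r : A) :
    l.foldl (fun r j => if i == j then g r j else r) r = r := by
  induction l generalizing r with
  | nil => rfl
  | cons a l ih =>
    have ha : (i == a) = false := by simpa using h a (List.mem_cons_self ..)
    rw [List.foldl_cons, ha, if_neg (by simp)]
    exact ih (fun j hj => h j (List.mem_cons_of_mem _ hj)) r

-- inner loop: exactly one j (namely j = i) fires
theorem inner_fold {A : Type} (g : A -> Int -> A) (i lo hi : Int)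
    (h1 : lo ≤ i) (h2 : i < hi) (r : A) :
    (PySem.List.pyRange lo hi 1).foldl (fun r j => if i == j then g r j else r) r = g r i := by
  rw [PySem.List.pyRange_one_append lo i hi h1 (le_of_lt h2), List.foldl_append]
  rw [foldl_if_skip g i (PySem.List.pyRange lo i 1) (fun j hj => by
        have := (PySem.List.mem_pyRange_one.mp hj).2; omega)]
  rw [PySem.List.pyRange_one_cons h2, List.foldl_cons, if_pos (by simp)]
  exact foldl_if_skip g i (PySem.List.pyRange (i + 1) hi 1) (fun j hj => by
        have := (PySem.List.mem_pyRange_one.mp hj).1; omega) _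

-- the zero matrix of the comprehension, as replicate
theorem init_matrix (x : List Int) :
    ((PySem.List.pyRange 0 (x.length : Int) 1).map
      (fun _ => (PySem.List.pyRange 0 (x.length : Int) 1).map (fun _ => (0 : Int))))
    = List.replicate x.length (List.replicate x.length (0 : Int)) := by
  have h : forall {B : Type} (c : B), (PySem.List.pyRange 0 (x.length : Int) 1).map (fun _ => c)
      = List.replicate x.length c := by
    intro B c
    rw [List.map_const']
    congr 1
    simp [PySem.List.length_pyRange_one]
  rw [h, h]

-- outer loop invariant for A
theorem outer_fold (x : List Int) (m : Nat) (hm : m ≤ x.length) :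
    (PySem.List.pyRange 0 (m : Int) 1).foldl (fun result i =>
      (PySem.List.pyRange 0 (x.length : Int) 1).foldl (fun result j =>
        if i == j then
          result.set i.toNat ((result.getD i.toNat []).set j.toNat (PySem.List.pyGetD x i 0))
        else result) result)
      (List.replicate x.length (List.replicate x.length (0 : Int)))
    = pvDiag x m ++ List.replicate (x.length - m) (List.replicate x.length (0 : Int)) := by
  induction m with
  | zero =>
    rw [show ((0 : Nat) : Int) = 0 by rfl, PySem.List.pyRange_one_eq_nil le_rfl]
    simp [pvDiag]
  | succ m ih =>
    have hm' : m ≤ x.length := Nat.le_of_succ_le hm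
    have hcast : ((m + 1 : Nat) : Int) = (m : Int) + 1 := by push_cast; ring
    rw [hcast, PySem.List.pyRange_one_succ_right (by positivity), List.foldl_append, ih hm',
        List.foldl_cons, List.foldl_nil,
        inner_fold _ (m : Int) 0 (x.length : Int) (by positivity) (by exact_mod_cast hm)]
    have hlen : (pvDiag x m).length = m := pvDiag_length x m
    have hrep : List.replicate (x.length - m) (List.replicate x.length (0 : Int))
        = List.replicate x.length (0 : Int) :: List.replicate (x.length - (m + 1)) (List.replicate x.length (0 : Int)) := by
      rw [show x.length - m = (x.length - (m + 1)) + 1 by omega, List.replicate_succ]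
    have hget : (pvDiag x m ++ List.replicate (x.length - m) (List.replicate x.length (0 : Int))).getD
        (m : Int).toNat [] = List.replicate x.length (0 : Int) := by
      rw [Int.toNat_natCast, hrep, List.getD_eq_getElem?_getD, List.getElem?_append_right (by omega),
          hlen]
      simp
    rw [hget, Int.toNat_natCast, List.set_append, if_neg (by omega), hlen, hrep, Nat.sub_self,
        List.set_cons_zero, pvDiag_succ, List.append_assoc, List.singleton_append]

-- ===== B-side lemmas =====

theorem pvDiag_flatten_length (x : List Int) (m : Nat) :
    (pvDiag x m).flatten.length = m * x.length := by
  induction m with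
  | zero => simp [pvDiag]
  | succ m ih =>
    rw [pvDiag_succ, List.flatten_append, List.length_append, ih]
    simp [Nat.succ_mul]

-- B's write loop fills the flat buffer with the flattened diagonal rows
theorem flat_fold (x : List Int) (m : Nat) (hm : m ≤ x.length) :
    (PySem.List.pyRange 0 (m : Int) 1).foldl
      (fun flat i => flat.set (i.toNat * (x.length + 1)) (PySem.List.pyGetD x i 0))
      (List.replicate (x.length * x.length) (0 : Int))
    = (pvDiag x m).flatten ++ List.replicate (x.length * x.length - m * x.length) (0 : Int) := by
  induction m with
  | zero =>
    rw [show ((0 : Nat) : Int) = 0 by rfl, PySem.List.pyRange_one_eq_nil le_rfl]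
    simp [pvDiag]
  | succ m ih =>
    have hm' : m ≤ x.length := Nat.le_of_succ_le hm
    have hmlt : m < x.length := hm
    have hcast : ((m + 1 : Nat) : Int) = (m : Int) + 1 := by push_cast; ring
    have hflen : (pvDiag x m).flatten.length = m * x.length := pvDiag_flatten_length x m
    have hbig : m * x.length + x.length ≤ x.length * x.length := by
      have := Nat.mul_le_mul_right x.length hm
      calc m * x.length + x.length = (m + 1) * x.length := by ring
        _ ≤ x.length * x.length := this
    have hrep : List.replicate (x.length * x.length - m * x.length) (0 : Int)
        = List.replicate x.length (0 : Int) ++ List.replicate (x.length * x.length - (m + 1) * x.length) (0 : Int) := by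
      rw [List.replicate_append_replicate]
      congr 1
      have : (m + 1) * x.length = m * x.length + x.length := by ring
      omega
    rw [hcast, PySem.List.pyRange_one_succ_right (by positivity), List.foldl_append, ih hm',
        List.foldl_cons, List.foldl_nil, Int.toNat_natCast,
        List.set_append,
        if_neg (by
          rw [hflen]
          have hh : m * (x.length + 1) = m * x.length + m := by ring
          omega),
        hflen,
        show m * (x.length + 1) - m * x.length = m from by
          have hh : m * (x.length + 1) = m * x.length + m := by ring
          omega,
        hrep, List.set_append, if_pos (by simpa using hmlt),
        pvDiag_succ, List.flatten_append, List.append_assoc]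
    simp

-- the k-th n-slice of the flattened diagonal rows is the k-th diagonal row
theorem chunk_eq (x : List Int) (m k : Nat) (hk : k < m) :
    ((pvDiag x m).flatten.drop (k * x.length)).take x.length
      = (List.replicate x.length (0 : Int)).set k (PySem.List.pyGetD x (k : Int) 0) := by
  induction m with
  | zero => omega
  | succ m ih =>
    rcases Nat.lt_succ_iff_lt_or_eq.mp hk with h | h
    · rw [pvDiag_succ, List.flatten_append, List.drop_append_of_le_length
          (by rw [pvDiag_flatten_length]; exact Nat.mul_le_mul_right _ (by omega)),
          List.take_append_of_le_length
          (by rw [List.length_drop, pvDiag_flatten_length]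
              have h1 : (k + 1) * x.length ≤ m * x.length := Nat.mul_le_mul_right _ h
              have h2 : (k + 1) * x.length = k * x.length + x.length := by ring
              omega)]
      exact ih h
    · subst h
      rw [pvDiag_succ, List.flatten_append, List.drop_append_of_le_length
          (by rw [pvDiag_flatten_length]), List.drop_of_length_le (by rw [pvDiag_flatten_length]),
          List.nil_append]
      simp

-- B in the same normal form
theorem altchar (x : List Int) : make_diagonal_alt x = pvDiag x x.length := by
  simp only [make_diagonal_alt]
  rw [PySem.List.enumerate_eq_map_pyRange (d := 0),
      show PySem.List.len x = (x.length : Int) from rfl, List.foldl_map,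
      flat_fold x x.length le_rfl, Nat.sub_self, List.replicate_zero, List.append_nil]
  -- now slice the flattened rows back into rows
  rw [PySem.List.pyRange_one, List.map_map, pvDiag]
  apply List.map_congr_left
  intro k hk
  have hk' : k < x.length := List.mem_range.mp hk
  have hcast1 : (0 + (k : Int)) * (x.length : Int) = ((k * x.length : Nat) : Int) := by push_cast; ring
  have hcast2 : (0 + (k : Int) + 1) * (x.length : Int) = (((k + 1) * x.length : Nat) : Int) := by push_cast; ring
  simp only [Function.comp]
  rw [hcast1, hcast2, PySem.List.slice_natCast]
  have htake : (k + 1) * x.length - k * x.length = x.length := by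
    have : (k + 1) * x.length = k * x.length + x.length := by ring
    omega
  rw [htake]
  exact chunk_eq x x.length k hk'

theorem make_diagonal_eq (x : List Int) : make_diagonal x = make_diagonal_alt x := by
  simp only [make_diagonal]
  rw [init_matrix, outer_fold x x.length le_rfl, Nat.sub_self, List.replicate_zero,
      List.append_nil, altchar]

-- ===== VERDICT (by name: the statement is the Claim_ definition above) =====
theorem make_diagonal_spec : Claim_equal_make_diagonal := by
  intro x _
  unfold Spec_make_diagonal
  exact make_diagonal_eq x
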